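-- pv_equiv track=rewrite | github.com/ishita7077/runpod_braindiff_test | tests/test_atlas_labels.py | _candidates
-- ===== SOURCE A (Python) =====
-- def _candidates(area: str, hemi: str) -> list[str]:
--     base = [
--         area,
--         f"L_{area}_ROI" if hemi == "left" else f"R_{area}_ROI",
--         f"L_{area}" if hemi == "left" else f"R_{area}",
--         f"lh.{area}" if hemi == "left" else f"rh.{area}",
--         f"ctx_lh_{area}" if hemi == "left" else f"ctx_rh_{area}",
--     ]
--     if area == "32":
--         for alias in ["d32", "p32", "s32", "a32pr", "p32pr"]:
--             base.extend(
--                 [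
--                     alias,
--                     f"L_{alias}_ROI" if hemi == "left" else f"R_{alias}_ROI",
--                     f"L_{alias}" if hemi == "left" else f"R_{alias}",
--                     f"lh.{alias}" if hemi == "left" else f"rh.{alias}",
--                     f"ctx_lh_{alias}" if hemi == "left" else f"ctx_rh_{alias}",
--                 ]
--             )
--     return base
-- ===== SOURCE B (Python) =====
-- def _candidates(area: str, hemi: str) -> list[str]:
--     # All variant shapes derived from one hemisphere character via a (prefix, suffix)
--     # template table; names expanded recursively instead of A's inline f-string list + extend loop.
--     h = "l" if hemi == "left" else "r"
--     side = h.upper() + "_"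
--     pairs = [("", ""), (side, "_ROI"), (side, ""), (h + "h.", ""), ("ctx_" + h + "h_", "")]
--
--     def expand(names):
--         if not names:
--             return []
--         n = names[0]
--         return [p + n + s for p, s in pairs] + expand(names[1:])
--
--     return expand([area] + (["d32", "p32", "s32", "a32pr", "p32pr"] if area == "32" else []))
-- ===== Notes on version B (the rewrite author's own statement) =====
-- stated objective: alternative
-- what changed: Replaces A's inline per-variant hemi conditionals and extend loop with a (prefix,suffix) template table derived from a single hemisphere character, applied by a recursive expansion over the name list.
import Mathlib
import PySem

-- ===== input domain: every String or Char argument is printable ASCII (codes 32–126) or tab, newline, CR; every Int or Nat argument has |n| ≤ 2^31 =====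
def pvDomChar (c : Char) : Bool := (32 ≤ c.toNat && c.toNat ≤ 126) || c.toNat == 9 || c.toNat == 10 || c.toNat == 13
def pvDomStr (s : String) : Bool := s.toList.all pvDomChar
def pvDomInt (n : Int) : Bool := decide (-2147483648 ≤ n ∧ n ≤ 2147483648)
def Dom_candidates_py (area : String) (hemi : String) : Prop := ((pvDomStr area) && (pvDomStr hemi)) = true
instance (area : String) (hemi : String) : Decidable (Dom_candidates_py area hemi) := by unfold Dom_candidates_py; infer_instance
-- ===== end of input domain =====

-- B derives a (prefix,suffix) template table from a single hemisphere character and expands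
-- the name list recursively, instead of A's inline conditional f-strings plus extend loop
-- (objective: alternative; same cost).


-- ===== PORT A =====
def candidates_py (area : String) (hemi : String) : List String :=
  let base : List String :=
    [ area,
      if hemi == "left" then "L_" ++ area ++ "_ROI" else "R_" ++ area ++ "_ROI",
      if hemi == "left" then "L_" ++ area else "R_" ++ area,
      if hemi == "left" then "lh." ++ area else "rh." ++ area,
      if hemi == "left" then "ctx_lh_" ++ area else "ctx_rh_" ++ area ]
  if area == "32" then
    ["d32", "p32", "s32", "a32pr", "p32pr"].foldl (fun b al =>
      b ++ [ al,
             if hemi == "left" then "L_" ++ al ++ "_ROI" else "R_" ++ al ++ "_ROI",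
             if hemi == "left" then "L_" ++ al else "R_" ++ al,
             if hemi == "left" then "lh." ++ al else "rh." ++ al,
             if hemi == "left" then "ctx_lh_" ++ al else "ctx_rh_" ++ al ]) base
  else base

-- ===== PORT B =====
-- recursive expansion of the name list through the template table (Source B's inner `expand`)
def pvExpand (pairs : List (String × String)) : List String → List String
  | [] => []
  | n :: rest => pairs.map (fun p => p.1 ++ n ++ p.2) ++ pvExpand pairs rest

def candidates_py_alt (area : String) (hemi : String) : List String :=
  let h : String := if hemi == "left" then "l" else "r"
  let side : String := PySem.Str.upper h ++ "_"
  let pairs : List (String × String) :=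
    [("", ""), (side, "_ROI"), (side, ""), (h ++ "h.", ""), ("ctx_" ++ h ++ "h_", "")]
  pvExpand pairs ([area] ++ (if area == "32" then ["d32", "p32", "s32", "a32pr", "p32pr"] else []))

-- ===== PRECONDITION & SPEC =====
def Spec_candidates_py (area : String) (hemi : String) (out : List String) : Prop := out = candidates_py_alt area hemi
instance (area : String) (hemi : String) (out : List String) : Decidable (Spec_candidates_py area hemi out) := by unfold Spec_candidates_py; infer_instance

-- ===== CLAIM =====
def Claim_equal_candidates_py : Prop := ∀ (area : String) (hemi : String), Dom_candidates_py area hemi → Spec_candidates_py area hemi (candidates_py area hemi)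

-- ===== LEMMAS AND PROOFS =====

-- ===== VERDICT =====
theorem candidates_py_spec : Claim_equal_candidates_py := by
  intro area hemi _
  unfold Spec_candidates_py candidates_py candidates_py_alt
  by_cases h1 : hemi == "left" <;> by_cases h2 : area == "32" <;>
    simp [h1, h2, List.foldl, pvExpand, PySem.Str.upper] <;> decide
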